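-- pv_equiv track=rewrite | github.com/tmkimm/Algorithm | programmers/키패드누르기.py | cal_distince
-- ===== SOURCE A (Python) =====
-- def cal_distince(now, target):
--     result = 0
--     if now > target:
--         bigger = now
--         smaller = target
--     else:
--         bigger = target
--         smaller = now
--
--     while bigger - 3 >= smaller:
--         result += 1
--         bigger -= 3
--
--         if bigger == smaller:
--             return result
--
--     while bigger != smaller:
--         result += 1
--         bigger -= 1
--
--     return result
-- ===== SOURCE B (Python) =====
-- def cal_distince(now, target):
--     q, r = divmod(abs(now - target), 3)
--     return q + r
-- ===== Notes on version B (the rewrite author's own statement) =====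
-- stated objective: simpler
-- what changed: Replaces both subtract-loops with the closed form divmod(|now-target|, 3): q counts the 3-steps, r the 1-steps, result q+r.
import Mathlib
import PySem

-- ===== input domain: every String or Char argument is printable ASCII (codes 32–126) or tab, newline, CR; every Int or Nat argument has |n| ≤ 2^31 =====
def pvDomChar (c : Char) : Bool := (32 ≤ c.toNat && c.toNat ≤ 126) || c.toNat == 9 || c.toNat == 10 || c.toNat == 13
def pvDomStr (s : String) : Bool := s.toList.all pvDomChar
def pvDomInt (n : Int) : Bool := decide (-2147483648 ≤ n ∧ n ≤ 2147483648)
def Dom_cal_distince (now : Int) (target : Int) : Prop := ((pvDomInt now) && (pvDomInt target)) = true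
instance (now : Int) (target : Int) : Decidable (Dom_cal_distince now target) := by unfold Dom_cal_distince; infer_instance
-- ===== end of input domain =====

-- B replaces A's two subtract-loops with the closed form divmod(|now-target|, 3), returning q + r (simpler, O(1)).


-- ===== PORT A =====
-- second while-loop: while bigger != smaller: result += 1; bigger -= 1
-- (fuel-totalized; within A it is always entered with bigger ≥ smaller and fuel = bigger - smaller)
def pvGo2 : Nat → Int → Int → Int → Int
  | 0, _, _, result => result
  | f + 1, bigger, smaller, result =>
    if bigger = smaller then result else pvGo2 f (bigger - 1) smaller (result + 1)

-- first while-loop: while bigger - 3 >= smaller: result += 1; bigger -= 3; if bigger == smaller: return result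
def pvGo1 : Nat → Int → Int → Int → Int
  | 0, bigger, smaller, result => pvGo2 (bigger - smaller).toNat bigger smaller result
  | f + 1, bigger, smaller, result =>
    if bigger - 3 ≥ smaller then
      if bigger - 3 = smaller then result + 1
      else pvGo1 f (bigger - 3) smaller (result + 1)
    else pvGo2 (bigger - smaller).toNat bigger smaller result

def cal_distince (now : Int) (target : Int) : Int :=
  let p : Int × Int := if now > target then (now, target) else (target, now)
  pvGo1 (p.1 - p.2).toNat p.1 p.2 0

-- ===== PORT B =====
def cal_distince_alt (now : Int) (target : Int) : Int :=
  let d : Int := |now - target|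
  PySem.Int.floordiv d 3 + PySem.Int.mod d 3

-- ===== PRECONDITION & SPEC =====
def Spec_cal_distince (now : Int) (target : Int) (out : Int) : Prop := out = cal_distince_alt now target
instance (now : Int) (target : Int) (out : Int) : Decidable (Spec_cal_distince now target out) := by unfold Spec_cal_distince; infer_instance

-- ===== CLAIM (what is proved, stated in full; the proofs are below) =====
def Claim_equal_cal_distince : Prop := ∀ (now : Int) (target : Int), Dom_cal_distince now target → Spec_cal_distince now target (cal_distince now target)

-- ===== LEMMAS AND PROOFS =====
theorem pvGo2_eq (f : Nat) : ∀ (b s r : Int), s ≤ b → (b - s).toNat ≤ f →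
    pvGo2 f b s r = r + (b - s) := by
  induction f with
  | zero => intro b s r hbs hf; simp [pvGo2]; omega
  | succ f ih =>
    intro b s r hbs hf
    simp only [pvGo2]
    split
    · omega
    · rw [ih (b - 1) s (r + 1) (by omega) (by omega)]; omega

theorem pvGo1_eq (f : Nat) : ∀ (b s r : Int), s ≤ b → (b - s).toNat ≤ f →
    pvGo1 f b s r = r + (b - s) / 3 + (b - s) % 3 := by
  induction f with
  | zero =>
    intro b s r hbs hf
    have hbz : b = s := by omega
    simp [pvGo1, pvGo2, hbz]
  | succ f ih =>
    intro b s r hbs hf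
    simp only [pvGo1]
    split
    · split
      · omega
      · rw [ih (b - 3) s (r + 1) (by omega) (by omega)]
        omega
    · rw [pvGo2_eq _ b s r hbs (by omega)]
      omega

theorem pvMain (b s : Int) (hbs : s ≤ b) :
    pvGo1 (b - s).toNat b s 0 = PySem.Int.floordiv (b - s) 3 + PySem.Int.mod (b - s) 3 := by
  rw [pvGo1_eq _ b s 0 hbs (le_refl _),
    PySem.Int.floordiv_eq_ediv_of_pos (by omega : (0:Int) < 3),
    PySem.Int.mod_eq_emod_of_pos (by omega : (0:Int) < 3)]
  ring

-- ===== VERDICT (by name: the statement is the Claim_ definition above) =====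
theorem cal_distince_spec : Claim_equal_cal_distince := by
  intro now target _
  unfold Spec_cal_distince cal_distince cal_distince_alt
  by_cases h : now > target
  · simp only [if_pos h]
    rw [abs_of_pos (by omega : (0:Int) < now - target)]
    exact pvMain now target (by omega)
  · simp only [if_neg h]
    rw [abs_of_nonpos (by omega : now - target ≤ 0), neg_sub]
    exact pvMain target now (by omega)
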